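-- pv_equiv track=rewrite | github.com/tm-shad/AdventOfCode | 2021/Q09/9.2_troy.py | get_heigher_basin_points
-- ===== SOURCE A (Python) =====
-- from typing import Dict, List, Set
--
-- def get_heigher_basin_points(i, j, array) -> Set:
--     curr_height = array[i][j]
--     if curr_height == 9:
--         return []
--
--     p_points = []
--     max_i = len(array) - 1
--     max_j = len(array[i]) - 1
--
--     if (i - 1) >= 0:
--         p_points.append([i - 1, j])
--     if (i + 1) <= max_i:
--         p_points.append([i + 1, j])
--     if (j + 1) <= max_j:
--         p_points.append([i, j + 1])
--     if (j - 1) >= 0: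
--         p_points.append([i, j - 1])
--
--     basin_points = [(i, j)]
--     for (x, y) in p_points:
--         if array[x][y] > curr_height:
--             basin_points.extend(get_heigher_basin_points(x, y, array))
--
--     return basin_points
-- ===== SOURCE B (Python) =====
-- def get_heigher_basin_points(i, j, array):
--     out = []
--     stack = [(i, j)]
--     while stack:
--         x, y = stack.pop()
--         h = array[x][y]
--         if h == 9:
--             continue
--         out.append((x, y))
--         nbrs = []
--         if x - 1 >= 0:
--             nbrs.append((x - 1, y))
--         if x + 1 <= len(array) - 1:
--             nbrs.append((x + 1, y))
--         if y + 1 <= len(array[x]) - 1: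
--             nbrs.append((x, y + 1))
--         if y - 1 >= 0:
--             nbrs.append((x, y - 1))
--         stack.extend(reversed([(a, b) for (a, b) in nbrs if array[a][b] > h]))
--     return out
-- ===== Notes on version B (the rewrite author's own statement) =====
-- stated objective: alternative
-- what changed: Replaces A's recursive flood expansion with an iterative preorder DFS over an explicit stack (pop a cell, emit it, push its strictly-higher in-bounds neighbors reversed), preserving A's exact visit order and duplicates.
-- outside the precondition, e.g. on get_heigher_basin_points(0, 0, [[1], [2, 9]]): A returns [(0, 0), (1, 0)], B returns [(0, 0), (1, 0)]
import Mathlib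
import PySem

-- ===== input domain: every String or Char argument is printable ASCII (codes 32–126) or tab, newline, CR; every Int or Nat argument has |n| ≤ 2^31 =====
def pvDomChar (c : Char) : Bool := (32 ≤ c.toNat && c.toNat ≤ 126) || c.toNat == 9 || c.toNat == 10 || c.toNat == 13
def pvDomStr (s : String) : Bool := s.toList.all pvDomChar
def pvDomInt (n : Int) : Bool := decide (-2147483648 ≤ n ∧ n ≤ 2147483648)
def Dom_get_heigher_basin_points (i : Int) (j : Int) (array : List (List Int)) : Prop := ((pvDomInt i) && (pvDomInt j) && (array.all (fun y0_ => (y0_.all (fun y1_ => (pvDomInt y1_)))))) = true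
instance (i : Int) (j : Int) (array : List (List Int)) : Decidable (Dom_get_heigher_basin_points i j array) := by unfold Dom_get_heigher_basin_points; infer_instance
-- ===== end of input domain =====

-- B replaces A's recursion with an iterative preorder DFS on an explicit stack, preserving A's
-- exact visit order and duplicates; equivalence of RETURN values is proved on rectangular grids
-- with an in-range (possibly negative, Python-style) start cell.

-- array[x][y] as Python computes it (negative indices from the end; none = IndexError)
def pvGet2 (array : List (List Int)) (x y : Int) : Option Int :=
  (PySem.List.pyGet? array x).bind (fun row => PySem.List.pyGet? row y)

-- number of grid cells strictly higher than h (termination measure ingredient)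
def pvCnt (array : List (List Int)) (h : Int) : Nat :=
  (array.flatten.filter (fun v => decide (h < v))).length

def pvMu (array : List (List Int)) (x y : Int) : Nat :=
  match pvGet2 array x y with
  | none => 0
  | some c => pvCnt array c

-- strictly fewer cells exceed b than exceed a, when a < b and b is itself a cell
theorem pvFilterLt {l : List Int} {a b : Int} (hmem : b ∈ l) (hab : a < b) :
    (l.filter (fun v => decide (b < v))).length < (l.filter (fun v => decide (a < v))).length := by
  induction l with
  | nil => cases hmem
  | cons c t ih =>
    rcases List.mem_cons.mp hmem with hbc | hm
    · subst hbc
      have hle : (t.filter (fun v => decide (b < v))).length ≤ (t.filter (fun v => decide (a < v))).length := by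
        rw [← List.countP_eq_length_filter, ← List.countP_eq_length_filter]
        exact List.countP_mono_left (fun x _ hx => by
          simp only [decide_eq_true_eq] at hx ⊢; exact hab.trans hx)
      simp only [List.filter_cons, decide_eq_true_eq, lt_irrefl, if_false, hab, if_true]
      simp only [List.length_cons]
      omega
    · have hlt := ih hm
      by_cases h1 : b < c
      · have h2 : a < c := hab.trans h1
        simp only [List.filter_cons, decide_eq_true_eq, h1, h2, if_true, List.length_cons]
        omega
      · by_cases h2 : a < c
        · simp only [List.filter_cons, decide_eq_true_eq, h1, h2, if_true, if_false, List.length_cons]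
          omega
        · simp only [List.filter_cons, decide_eq_true_eq, h1, h2, if_false]
          omega

theorem pvMem_of_get2 {array : List (List Int)} {x y : Int} {h : Int}
    (hx : pvGet2 array x y = some h) : h ∈ array.flatten := by
  unfold pvGet2 at hx
  cases hrow : PySem.List.pyGet? array x with
  | none => rw [hrow] at hx; cases hx
  | some row =>
    rw [hrow] at hx
    simp only [Option.bind_some] at hx
    exact List.mem_flatten.mpr ⟨row, PySem.List.mem_of_pyGet?_eq_some _ hrow,
      PySem.List.mem_of_pyGet?_eq_some _ hx⟩

theorem pvMuLtCnt {array : List (List Int)} {x y : Int} {curr h : Int}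
    (hx : pvGet2 array x y = some h) (hch : curr < h) :
    pvMu array x y < pvCnt array curr := by
  unfold pvMu; rw [hx]
  exact pvFilterLt (pvMem_of_get2 hx) hch

-- the in-bounds candidate neighbors, in A's (and B's) up/down/right/left order; both Python
-- versions contain this identical four-guard block, factored here once
def pvPPoints (i j nrows ncols : Int) : List (Int × Int) :=
  (if i - 1 ≥ 0 then [(i - 1, j)] else []) ++
  (if i + 1 ≤ nrows - 1 then [(i + 1, j)] else []) ++
  (if j + 1 ≤ ncols - 1 then [(i, j + 1)] else []) ++
  (if j - 1 ≥ 0 then [(i, j - 1)] else [])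

theorem pvPPoints_len (i j nrows ncols : Int) : (pvPPoints i j nrows ncols).length ≤ 4 := by
  unfold pvPPoints; split_ifs <;> simp

-- ===== PORT A =====
mutual
def get_heigher_basin_points (i : Int) (j : Int) (array : List (List Int)) : List (Int × Int) :=
  match hr : PySem.List.pyGet? array i with
  | none => []          -- Python: array[i] raises IndexError (outside Pre_)
  | some row =>
    match hc : PySem.List.pyGet? row j with
    | none => []        -- Python: array[i][j] raises IndexError (outside Pre_)
    | some curr =>
      if curr = 9 then []
      else
        pvBasinLoop curr array
          (pvPPoints i j (array.length : Int) (row.length : Int))  -- the four guarded appends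
          [(i, j)]
termination_by (pvMu array i j, 1, 0)
decreasing_by
  have hm : pvMu array i j = pvCnt array curr := by
    unfold pvMu pvGet2; rw [hr]; simp [hc]
  simp_wf
  rw [hm]
  exact Prod.Lex.right _ (Prod.Lex.left _ _ (by omega))

-- the 'for (x, y) in p_points' loop of A, carrying basin_points as acc
def pvBasinLoop (curr : Int) (array : List (List Int)) (pts : List (Int × Int))
    (acc : List (Int × Int)) : List (Int × Int) :=
  match pts with
  | [] => acc
  | (x, y) :: rest =>
    match hxy : pvGet2 array x y with
    | none => pvBasinLoop curr array rest acc   -- Python: array[x][y] raises (outside Pre_)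
    | some h =>
      if hch : curr < h then
        pvBasinLoop curr array rest (acc ++ get_heigher_basin_points x y array)
      else pvBasinLoop curr array rest acc
termination_by (pvCnt array curr, 0, pts.length)
decreasing_by
  all_goals simp_wf
  all_goals first
    | exact Prod.Lex.left _ _ (pvMuLtCnt hxy hch)
    | exact Prod.Lex.right _ (Prod.Lex.right _ (by omega))
end

-- ===== PORT B =====
-- Iterative preorder DFS. The Lean list's head is the TOP of Python B's stack: Python pops from
-- the end and pushes the kept neighbors reversed; here we pop the head and prepend them in order.
def pvAltLoop (array : List (List Int)) (stack : List (Int × Int))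
    (out : List (Int × Int)) : List (Int × Int) :=
  match stack with
  | [] => out
  | (x, y) :: rest =>
    match hrow : PySem.List.pyGet? array x with
    | none => out       -- Python: array[x] raises IndexError (outside Pre_)
    | some row =>
      match hcur : PySem.List.pyGet? row y with
      | none => out     -- Python: array[x][y] raises IndexError (outside Pre_)
      | some h =>
        if h9 : h = 9 then pvAltLoop array rest out
        else
          pvAltLoop array
            (((pvPPoints x y (array.length : Int) (row.length : Int)).filter
                (fun c => match pvGet2 array c.1 c.2 with
                  | some h2 => decide (h < h2)
                  | none => false)) ++ rest)
            (out ++ [(x, y)])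
termination_by (stack.map (fun c => 5 ^ pvMu array c.1 c.2)).sum
decreasing_by
  · simp_wf
  · simp_wf
    have hm : pvMu array x y = pvCnt array h := by
      unfold pvMu pvGet2; rw [hrow]; simp [hcur]
    set kept := ((pvPPoints x y (array.length : Int) (row.length : Int)).filter
                (fun c => match pvGet2 array c.1 c.2 with
                  | some h2 => decide (h < h2)
                  | none => false)) with hkept
    have hlt : ∀ c ∈ kept, pvMu array c.1 c.2 < pvCnt array h := by
      intro c hc
      have := List.of_mem_filter hc
      cases hg : pvGet2 array c.1 c.2 with
      | none => rw [hg] at this; simp at this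
      | some h2 =>
        rw [hg] at this; simp at this
        exact pvMuLtCnt hg this
    have hsum : (kept.map (fun c => 5 ^ pvMu array c.1 c.2)).sum < 5 ^ pvCnt array h := by
      rcases kept with _ | ⟨c0, ktl⟩
      · simpa using Nat.pow_pos (a := 5) (n := pvCnt array h) (by omega)
      · have hpos : 1 ≤ pvCnt array h := by
          have := hlt c0 (List.mem_cons_self ..)
          omega
        have hb : ∀ v ∈ ((c0 :: ktl).map (fun c => 5 ^ pvMu array c.1 c.2)), v ≤ 5 ^ (pvCnt array h - 1) := by
          intro v hv
          obtain ⟨c, hc, rfl⟩ := List.mem_map.mp hv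
          exact Nat.pow_le_pow_right (by omega) (by have := hlt c hc; omega)
        have hlen : ((c0 :: ktl).map (fun c => 5 ^ pvMu array c.1 c.2)).length ≤ 4 := by
          rw [List.length_map]
          calc (c0 :: ktl).length ≤ (pvPPoints x y (array.length : Int) (row.length : Int)).length := by
                rw [hkept]; exact List.length_filter_le _ _
            _ ≤ 4 := pvPPoints_len ..
        have := List.sum_le_card_nsmul _ _ hb
        have hpow : 5 ^ pvCnt array h = 5 * 5 ^ (pvCnt array h - 1) := by
          conv_lhs => rw [show pvCnt array h = (pvCnt array h - 1) + 1 by omega]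
          ring
        simp only [smul_eq_mul] at this
        nlinarith [this, hlen, Nat.pow_pos (a := 5) (n := pvCnt array h - 1) (show 0 < 5 by omega)]
    rw [hm]
    exact hsum

def get_heigher_basin_points_alt (i : Int) (j : Int) (array : List (List Int)) : List (Int × Int) :=
  pvAltLoop array [(i, j)] []

-- ===== PRECONDITION & SPEC =====
-- Pre_ admits any in-range start cell (Python's negative indices included) of a rectangular grid.
-- It excludes out-of-range starts, where A raises IndexError at array[i][j], and ragged grids, on
-- which A's neighbor access array[x][y] can raise IndexError.
def Pre_get_heigher_basin_points (i : Int) (j : Int) (array : List (List Int)) : Prop :=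
  (∀ row ∈ array, row.length = (array.headD []).length) ∧
  PySem.Raise.InRange array.length i ∧
  PySem.Raise.InRange (array.headD []).length j
instance (i : Int) (j : Int) (array : List (List Int)) : Decidable (Pre_get_heigher_basin_points i j array) := by unfold Pre_get_heigher_basin_points; infer_instance

def pvWitness_get_heigher_basin_points : Int × Int × List (List Int) := (0, 0, [[1, 2], [3, 9]])

def Spec_get_heigher_basin_points (i : Int) (j : Int) (array : List (List Int)) (out : List (Int × Int)) : Prop := out = get_heigher_basin_points_alt i j array
instance (i : Int) (j : Int) (array : List (List Int)) (out : List (Int × Int)) : Decidable (Spec_get_heigher_basin_points i j array out) := by unfold Spec_get_heigher_basin_points; infer_instance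

-- ===== CLAIM (what is proved, stated in full; the proofs are below) =====
def Claim_equal_get_heigher_basin_points : Prop := ∀ (i : Int) (j : Int) (array : List (List Int)), Dom_get_heigher_basin_points i j array → Pre_get_heigher_basin_points i j array → Spec_get_heigher_basin_points i j array (get_heigher_basin_points i j array)

-- ===== LEMMAS AND PROOFS =====

theorem pvRowLen {array : List (List Int)} {x : Int} {row : List Int}
    (hR : ∀ r ∈ array, r.length = (array.headD []).length)
    (hrow : PySem.List.pyGet? array x = some row) : row.length = (array.headD []).length :=
  hR row (PySem.List.mem_of_pyGet?_eq_some _ hrow)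

theorem pvRow_some {array : List (List Int)} {x : Int}
    (hx : PySem.Raise.InRange array.length x) :
    ∃ row, PySem.List.pyGet? array x = some row := by
  cases hg : PySem.List.pyGet? array x with
  | none => exact absurd hx ((PySem.List.pyGet?_eq_none_iff array x).mp hg)
  | some row => exact ⟨row, rfl⟩

theorem pvCell_some {array : List (List Int)} {x y : Int} {row : List Int}
    (hR : ∀ r ∈ array, r.length = (array.headD []).length)
    (hrow : PySem.List.pyGet? array x = some row)
    (hy : PySem.Raise.InRange (array.headD []).length y) :
    ∃ h, PySem.List.pyGet? row y = some h := by
  cases hg : PySem.List.pyGet? row y with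
  | none =>
    rw [PySem.List.pyGet?_eq_none_iff, pvRowLen hR hrow] at hg
    exact absurd hy hg
  | some h => exact ⟨h, rfl⟩

-- every candidate neighbor of an in-range cell of a rectangular grid is in range
theorem pvPPoints_ok {array : List (List Int)} {x y : Int} {row : List Int}
    (hR : ∀ r ∈ array, r.length = (array.headD []).length)
    (hrow : PySem.List.pyGet? array x = some row)
    (hx : PySem.Raise.InRange array.length x)
    (hy : PySem.Raise.InRange (array.headD []).length y) :
    ∀ c ∈ pvPPoints x y (array.length : Int) (row.length : Int),
      PySem.Raise.InRange array.length c.1 ∧ PySem.Raise.InRange (array.headD []).length c.2 := by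
  intro c hc
  have hw := pvRowLen hR hrow
  simp only [pvPPoints, List.mem_append] at hc
  unfold PySem.Raise.InRange at hx hy ⊢
  rw [hw] at hc
  rcases hc with ((hc | hc) | hc) | hc <;> split_ifs at hc <;> simp_all <;> omega

theorem pvFlatMapGuard (l : List (Int × Int)) (q : Int × Int → Bool) (f : Int × Int → List (Int × Int)) :
    l.flatMap (fun c => if q c then f c else []) = (l.filter q).flatMap f := by
  induction l with
  | nil => simp
  | cons a t ih => by_cases h : q a <;> simp [h, ih]

-- A's for-loop appends, left to right, the recursive basins of the strictly-higher points
theorem pvBasinLoop_eq (curr : Int) (array : List (List Int)) (pts acc : List (Int × Int)) :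
    pvBasinLoop curr array pts acc = acc ++ pts.flatMap (fun c =>
      if (match pvGet2 array c.1 c.2 with
          | some h2 => decide (curr < h2)
          | none => false) then get_heigher_basin_points c.1 c.2 array else []) := by
  induction pts generalizing acc with
  | nil => simp [pvBasinLoop]
  | cons p rest ih =>
    obtain ⟨x, y⟩ := p
    rw [pvBasinLoop]
    cases hg : pvGet2 array x y with
    | none => simp [hg, ih]
    | some h => by_cases hch : curr < h <;> simp [hg, hch, ih]

-- A at a non-9 cell: the cell, then the basins of its strictly-higher neighbors in order
theorem pvA_step {array : List (List Int)} {i j : Int} {row : List Int} {curr : Int}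
    (hrow : PySem.List.pyGet? array i = some row)
    (hcur : PySem.List.pyGet? row j = some curr) (h9 : curr ≠ 9) :
    get_heigher_basin_points i j array =
      (i, j) :: ((pvPPoints i j (array.length : Int) (row.length : Int)).filter
        (fun c => match pvGet2 array c.1 c.2 with
          | some h2 => decide (curr < h2)
          | none => false)).flatMap (fun c => get_heigher_basin_points c.1 c.2 array) := by
  rw [get_heigher_basin_points]
  split
  next heq => rw [hrow] at heq; cases heq
  next row' heq =>
    rw [hrow] at heq; injection heq with e; subst e
    split
    next heq2 => rw [hcur] at heq2; cases heq2
    next curr' heq2 =>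
      rw [hcur] at heq2; injection heq2 with e2; subst e2
      rw [if_neg h9, pvBasinLoop_eq, pvFlatMapGuard]
      simp

theorem pvA_nine {array : List (List Int)} {i j : Int} {row : List Int}
    (hrow : PySem.List.pyGet? array i = some row)
    (hcur : PySem.List.pyGet? row j = some 9) :
    get_heigher_basin_points i j array = [] := by
  rw [get_heigher_basin_points]
  split
  next heq => rfl
  next row' heq =>
    rw [hrow] at heq; injection heq with e; subst e
    split
    next heq2 => rfl
    next curr' heq2 =>
      rw [hcur] at heq2; injection heq2 with e2; subst e2
      simp

theorem pvAltLoop_step {array : List (List Int)} {x y : Int} {row : List Int} {h : Int}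
    (rest out : List (Int × Int))
    (hrow : PySem.List.pyGet? array x = some row)
    (hcur : PySem.List.pyGet? row y = some h) :
    pvAltLoop array ((x, y) :: rest) out =
      if h = 9 then pvAltLoop array rest out
      else pvAltLoop array
        (((pvPPoints x y (array.length : Int) (row.length : Int)).filter
            (fun c => match pvGet2 array c.1 c.2 with
              | some h2 => decide (h < h2)
              | none => false)) ++ rest)
        (out ++ [(x, y)]) := by
  rw [pvAltLoop]
  split
  next heq => rw [hrow] at heq; cases heq
  next row' heq =>
    rw [hrow] at heq; injection heq with e; subst e
    split
    next heq2 => rw [hcur] at heq2; cases heq2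
    next h' heq2 =>
      rw [hcur] at heq2; injection heq2 with e2; subst e2
      rfl

-- B's stack loop emits, after out, the concatenated A-basins of the stacked cells in order
theorem pvAltLoop_eq : ∀ (array : List (List Int)) (stack out : List (Int × Int)),
    (∀ r ∈ array, r.length = (array.headD []).length) →
    (∀ c ∈ stack, PySem.Raise.InRange array.length c.1 ∧
      PySem.Raise.InRange (array.headD []).length c.2) →
    pvAltLoop array stack out =
      out ++ stack.flatMap (fun c => get_heigher_basin_points c.1 c.2 array) := by
  intro array stack out
  induction stack, out using pvAltLoop.induct (array := array) with
  | case1 out => intro _ _; simp [pvAltLoop]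
  | case2 out x y rest hrow =>
    intro hR hV
    obtain ⟨row, hrow'⟩ := pvRow_some (hV (x, y) (List.mem_cons_self ..)).1
    rw [hrow'] at hrow; cases hrow
  | case3 out x y rest row hrow hcur =>
    intro hR hV
    obtain ⟨h, hcur'⟩ := pvCell_some hR hrow (hV (x, y) (List.mem_cons_self ..)).2
    rw [hcur'] at hcur; cases hcur
  | case4 out x y rest row hrow hcur ih =>
    intro hR hV
    rw [pvAltLoop_step rest out hrow hcur, if_pos rfl]
    rw [ih hR (fun c hc => hV c (List.mem_cons_of_mem _ hc))]
    simp [pvA_nine hrow hcur]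
  | case5 out x y rest row hrow curr hcur h9 ih =>
    intro hR hV
    rw [pvAltLoop_step rest out hrow hcur, if_neg h9]
    rw [ih hR ?valid]
    case valid =>
      intro c hc
      rcases List.mem_append.mp hc with hc | hc
      · exact pvPPoints_ok hR hrow (hV (x, y) (List.mem_cons_self ..)).1
          (hV (x, y) (List.mem_cons_self ..)).2 c (List.mem_of_mem_filter hc)
      · exact hV c (List.mem_cons_of_mem _ hc)
    simp only [List.flatMap_cons, List.flatMap_append]
    rw [pvA_step hrow hcur h9]
    simp

-- ===== VERDICT (by name: the statement is the Claim_ definition above) =====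
theorem get_heigher_basin_points_spec : Claim_equal_get_heigher_basin_points := by
  intro i j array _ hpre
  unfold Spec_get_heigher_basin_points get_heigher_basin_points_alt
  have hV : ∀ c ∈ [((i : Int), (j : Int))], PySem.Raise.InRange array.length c.1 ∧
      PySem.Raise.InRange (array.headD []).length c.2 := by
    intro c hc
    simp only [List.mem_singleton] at hc
    subst hc
    exact ⟨hpre.2.1, hpre.2.2⟩
  have := pvAltLoop_eq array [(i, j)] [] hpre.1 hV
  simp only [List.flatMap_cons, List.flatMap_nil, List.append_nil, List.nil_append] at this
  exact this.symm
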